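-- pv_equiv track=rewrite | github.com/adbcox/integrated-ai-platform | framework/contract_metadata_filter.py | rank_contracts_by_relevance
-- ===== SOURCE A (Python) =====
-- from typing import Any
--
-- def rank_contracts_by_relevance(contracts: list[dict[str, Any]], query: str) -> list[tuple[dict[str, Any], int]]:
--     scored = []
--     lower_query = query.lower()
--     for item in contracts:
--         if not isinstance(item, dict):
--             continue
--         name = item.get("name")
--         if not isinstance(name, str):
--             continue
--         lower_name = name.lower()
--         if lower_name == lower_query:
--             score = 100
--         elif lower_query in lower_name:
--             score = 50
--         else:
--             score = 0
--         if score > 0: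
--             scored.append((item, score))
--     scored.sort(key=lambda x: (-x[1], x[0].get("name", "")))
--     return scored
-- ===== SOURCE B (Python) =====
-- def rank_contracts_by_relevance(contracts, query):
--     lower_query = query.lower()
--     exact = []
--     partial = []
--     for item in contracts:
--         if not isinstance(item, dict):
--             continue
--         name = item.get("name")
--         if not isinstance(name, str):
--             continue
--         lower_name = name.lower()
--         if lower_name == lower_query:
--             exact.append((item, 100))
--         elif lower_query in lower_name:
--             partial.append((item, 50))
--     key = lambda x: x[0].get("name", "")
--     exact.sort(key=key)
--     partial.sort(key=key)
--     return exact + partial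
-- ===== Notes on version B (the rewrite author's own statement) =====
-- stated objective: alternative
-- what changed: Replaces the single sort with compound key (-score, name) by two buckets (exact/partial) filled during the scan, each sorted by name alone and concatenated exact-first.
import Mathlib
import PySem

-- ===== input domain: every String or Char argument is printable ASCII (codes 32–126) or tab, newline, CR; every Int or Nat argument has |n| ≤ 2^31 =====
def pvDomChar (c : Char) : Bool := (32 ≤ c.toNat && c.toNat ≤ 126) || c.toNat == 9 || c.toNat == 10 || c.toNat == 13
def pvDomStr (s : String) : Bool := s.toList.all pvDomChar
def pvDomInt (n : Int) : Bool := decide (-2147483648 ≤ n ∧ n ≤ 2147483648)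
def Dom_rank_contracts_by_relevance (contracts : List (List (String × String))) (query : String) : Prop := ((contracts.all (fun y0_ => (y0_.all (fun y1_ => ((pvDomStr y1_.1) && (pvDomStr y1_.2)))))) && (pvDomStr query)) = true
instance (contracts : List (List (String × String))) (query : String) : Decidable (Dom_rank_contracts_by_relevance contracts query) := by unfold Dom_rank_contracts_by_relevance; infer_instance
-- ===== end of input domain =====

-- B replaces A's single compound-key sort (-score, name) by two score buckets sorted by name alone and concatenated exact-first; same cost, different decomposition.


-- ===== PORT A =====
def rank_contracts_by_relevance (contracts : List (List (String × String))) (query : String) : List ((List (String × String)) × Int) :=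
  -- 'isinstance(item, dict)' is always true on this typed domain; 'isinstance(name, str)' = the lookup returned a value
  let lower_query := PySem.Str.lower query
  let scored := contracts.foldl (fun acc item =>
    match PySem.Dict.get? (PySem.Dict.mk item) "name" with
    | none => acc
    | some name =>
      let lower_name := PySem.Str.lower name
      let score : Int := if lower_name = lower_query then 100
        else if PySem.Str.isIn lower_query lower_name then 50
        else 0
      if score > 0 then acc ++ [(item, score)] else acc) []
  PySem.List.sorted2 scored (fun x => -x.2) (fun x => PySem.Dict.getD (PySem.Dict.mk x.1) "name" "") false

-- ===== PORT B =====
def rank_contracts_by_relevance_alt (contracts : List (List (String × String))) (query : String) : List ((List (String × String)) × Int) :=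
  let lower_query := PySem.Str.lower query
  let ep := contracts.foldl (fun (acc : List ((List (String × String)) × Int) × List ((List (String × String)) × Int)) item =>
    match PySem.Dict.get? (PySem.Dict.mk item) "name" with
    | none => acc
    | some name =>
      let lower_name := PySem.Str.lower name
      if lower_name = lower_query then (acc.1 ++ [(item, (100 : Int))], acc.2)
      else if PySem.Str.isIn lower_query lower_name then (acc.1, acc.2 ++ [(item, (50 : Int))])
      else acc) ([], [])
  PySem.List.sorted ep.1 (fun x => PySem.Dict.getD (PySem.Dict.mk x.1) "name" "") false
    ++ PySem.List.sorted ep.2 (fun x => PySem.Dict.getD (PySem.Dict.mk x.1) "name" "") false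

-- ===== PRECONDITION & SPEC =====
def Spec_rank_contracts_by_relevance (contracts : List (List (String × String))) (query : String) (out : List ((List (String × String)) × Int)) : Prop := out = rank_contracts_by_relevance_alt contracts query
instance (contracts : List (List (String × String))) (query : String) (out : List ((List (String × String)) × Int)) : Decidable (Spec_rank_contracts_by_relevance contracts query out) := by unfold Spec_rank_contracts_by_relevance; infer_instance

-- ===== CLAIM (what is proved, stated in full; the proofs are below) =====
def Claim_equal_rank_contracts_by_relevance : Prop := ∀ (contracts : List (List (String × String))) (query : String), Dom_rank_contracts_by_relevance contracts query → Spec_rank_contracts_by_relevance contracts query (rank_contracts_by_relevance contracts query)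

-- ===== LEMMAS AND PROOFS =====



-- proof-side abbreviations
abbrev pvPair : Type := (List (String × String)) × Int
def pvKey2 (x : pvPair) : String := PySem.Dict.getD (PySem.Dict.mk x.1) "name" ""
def pvBk2 (a b : pvPair) : Bool := decide (pvKey2 a < pvKey2 b)
def pvLex (a b : pvPair) : Bool :=
  decide ((fun x : pvPair => -x.2) a < (fun x : pvPair => -x.2) b) ||
    (!decide ((fun x : pvPair => -x.2) b < (fun x : pvPair => -x.2) a) && decide (pvKey2 a < pvKey2 b))
-- one scanned item's contribution to A's 'scored'
def pvG (lq : String) (item : List (String × String)) : List pvPair :=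
  match PySem.Dict.get? (PySem.Dict.mk item) "name" with
  | none => []
  | some name =>
    let ln := PySem.Str.lower name
    if ln = lq then [(item, (100 : Int))]
    else if PySem.Str.isIn lq ln then [(item, (50 : Int))]
    else []

lemma insertBy_append_right {α : Type} (before : α → α → Bool) (x : α) (E P : List α)
    (h : ∀ y ∈ P, before x y = true) :
    PySem.List.insertBy before x (E ++ P) = PySem.List.insertBy before x E ++ P := by
  induction E with
  | nil =>
    cases P with
    | nil => rfl
    | cons y ys => simp [PySem.List.insertBy, h y (by simp)]
  | cons e es ih =>
    simp only [List.cons_append, PySem.List.insertBy]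
    by_cases hb : before x e = true <;> simp [hb, ih]

lemma insertBy_append_left {α : Type} (before : α → α → Bool) (x : α) (E P : List α)
    (h : ∀ e ∈ E, before x e = false) :
    PySem.List.insertBy before x (E ++ P) = E ++ PySem.List.insertBy before x P := by
  induction E with
  | nil => rfl
  | cons e es ih =>
    simp only [List.cons_append, PySem.List.insertBy, h e (by simp)]
    simp only [Bool.false_eq_true, if_false, List.cons_inj_right]
    exact ih (fun e he => h e (by simp [he]))

lemma insertBy_congr {α : Type} (f g : α → α → Bool) (x : α) (ys : List α)
    (h : ∀ y ∈ ys, f x y = g x y) :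
    PySem.List.insertBy f x ys = PySem.List.insertBy g x ys := by
  induction ys with
  | nil => rfl
  | cons y t ih =>
    simp only [PySem.List.insertBy, h y (by simp)]
    by_cases hb : g x y = true <;> simp [hb, ih (fun z hz => h z (by simp [hz]))]

lemma pvLex_hi_lo (x y : pvPair) (hx : x.2 = 100) (hy : y.2 = 50) : pvLex x y = true := by
  simp [pvLex, hx, hy]
lemma pvLex_lo_hi (x y : pvPair) (hx : x.2 = 50) (hy : y.2 = 100) : pvLex x y = false := by
  simp [pvLex, hx, hy]
lemma pvLex_eq_bk2 (x y : pvPair) (h : x.2 = y.2) : pvLex x y = pvBk2 x y := by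
  simp [pvLex, pvBk2, h]

-- the heart: a stable insertion sort under the lexicographic key (-score, name) over a 100/50-scored
-- list is the name-sort of the 100-bucket followed by the name-sort of the 50-bucket
lemma split_fold (l : List pvPair) (hl : ∀ x ∈ l, x.2 = 100 ∨ x.2 = 50) :
    ∀ E P : List pvPair, (∀ e ∈ E, e.2 = 100) → (∀ p ∈ P, p.2 = 50) →
    l.foldl (fun acc x => PySem.List.insertBy pvLex x acc) (E ++ P)
      = (l.filter (fun x => x.2 == 100)).foldl (fun acc x => PySem.List.insertBy pvBk2 x acc) E
        ++ (l.filter (fun x => x.2 == 50)).foldl (fun acc x => PySem.List.insertBy pvBk2 x acc) P := by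
  induction l with
  | nil => intro E P _ _; simp
  | cons x t ih =>
    intro E P hE hP
    rcases hl x (by simp) with hx | hx
    · have step : PySem.List.insertBy pvLex x (E ++ P) = PySem.List.insertBy pvBk2 x E ++ P := by
        rw [insertBy_append_right pvLex x E P (fun y hy => pvLex_hi_lo x y hx (hP y hy))]
        rw [insertBy_congr pvLex pvBk2 x E (fun y hy => pvLex_eq_bk2 x y (by rw [hx, hE y hy]))]
      simp only [List.foldl_cons, step, List.filter_cons, hx]
      norm_num
      exact ih (fun z hz => hl z (by simp [hz])) _ _
        (fun e he => (PySem.List.mem_insertBy pvBk2 x e E |>.mp he).elim (fun h => h ▸ hx) (hE e)) hP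
    · have step : PySem.List.insertBy pvLex x (E ++ P) = E ++ PySem.List.insertBy pvBk2 x P := by
        rw [insertBy_append_left pvLex x E P (fun y hy => pvLex_lo_hi x y hx (hE y hy))]
        rw [insertBy_congr pvLex pvBk2 x P (fun y hy => pvLex_eq_bk2 x y (by rw [hx, hP y hy]))]
      simp only [List.foldl_cons, step, List.filter_cons, hx]
      norm_num
      exact ih (fun z hz => hl z (by simp [hz])) _ _ hE
        (fun p hp => (PySem.List.mem_insertBy pvBk2 x p P |>.mp hp).elim (fun h => h ▸ hx) (hP p))

-- A's scoring loop builds the flatMap of pvG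
lemma foldA_eq (lq : String) (l : List (List (String × String))) :
    ∀ acc : List pvPair,
    l.foldl (fun acc item =>
      match PySem.Dict.get? (PySem.Dict.mk item) "name" with
      | none => acc
      | some name =>
        let lower_name := PySem.Str.lower name
        let score : Int := if lower_name = lq then 100
          else if PySem.Str.isIn lq lower_name then 50
          else 0
        if score > 0 then acc ++ [(item, score)] else acc) acc
      = acc ++ l.flatMap (pvG lq) := by
  induction l with
  | nil => intro acc; simp
  | cons item t ih =>
    intro acc
    rw [List.foldl_cons]
    have hstep : (match PySem.Dict.get? (PySem.Dict.mk item) "name" with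
      | none => acc
      | some name =>
        let lower_name := PySem.Str.lower name
        let score : Int := if lower_name = lq then 100
          else if PySem.Str.isIn lq lower_name then 50
          else 0
        if score > 0 then acc ++ [(item, score)] else acc) = acc ++ pvG lq item := by
      cases hget : PySem.Dict.get? (PySem.Dict.mk item) "name" with
      | none => simp [pvG, hget]
      | some name =>
        by_cases h1 : PySem.Str.lower name = lq
        · simp [pvG, hget, h1]
        · by_cases h2 : PySem.Chars.isIn lq.toList (PySem.Chars.lower name.toList) = true
          · simp [pvG, hget, h1, h2]
          · simp [pvG, hget, h1, h2]
    rw [hstep, ih, List.flatMap_cons, List.append_assoc]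

-- B's scanning loop builds the two filtered buckets
lemma foldB_eq (lq : String) (l : List (List (String × String))) :
    ∀ E P : List pvPair,
    l.foldl (fun (acc : List pvPair × List pvPair) item =>
      match PySem.Dict.get? (PySem.Dict.mk item) "name" with
      | none => acc
      | some name =>
        let lower_name := PySem.Str.lower name
        if lower_name = lq then (acc.1 ++ [(item, (100 : Int))], acc.2)
        else if PySem.Str.isIn lq lower_name then (acc.1, acc.2 ++ [(item, (50 : Int))])
        else acc) (E, P)
      = (E ++ (l.flatMap (pvG lq)).filter (fun x => x.2 == 100),
         P ++ (l.flatMap (pvG lq)).filter (fun x => x.2 == 50)) := by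
  induction l with
  | nil => intro E P; simp
  | cons item t ih =>
    intro E P
    rw [List.foldl_cons]
    have hstep : (match PySem.Dict.get? (PySem.Dict.mk item) "name" with
      | none => ((E : List pvPair), (P : List pvPair))
      | some name =>
        let lower_name := PySem.Str.lower name
        if lower_name = lq then ((E, P).1 ++ [(item, (100 : Int))], (E, P).2)
        else if PySem.Str.isIn lq lower_name then ((E, P).1, (E, P).2 ++ [(item, (50 : Int))])
        else (E, P))
        = (E ++ (pvG lq item).filter (fun x => x.2 == 100),
           P ++ (pvG lq item).filter (fun x => x.2 == 50)) := by
      cases hget : PySem.Dict.get? (PySem.Dict.mk item) "name" with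
      | none => simp [pvG, hget]
      | some name =>
        by_cases h1 : PySem.Str.lower name = lq
        · simp [pvG, hget, h1]
        · by_cases h2 : PySem.Chars.isIn lq.toList (PySem.Chars.lower name.toList) = true
          · simp [pvG, hget, h1, h2]
          · simp [pvG, hget, h1, h2]
    rw [hstep, ih, List.flatMap_cons, List.filter_append, List.filter_append,
        List.append_assoc, List.append_assoc]

lemma pvG_scores (lq : String) (item : List (String × String)) :
    ∀ x ∈ pvG lq item, x.2 = 100 ∨ x.2 = 50 := by
  intro x hx
  unfold pvG at hx
  cases hget : PySem.Dict.get? (PySem.Dict.mk item) "name" with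
  | none => rw [hget] at hx; simp at hx
  | some name =>
    rw [hget] at hx
    by_cases h1 : PySem.Str.lower name = lq
    · simp [h1] at hx; left; rw [hx]
    · by_cases h2 : PySem.Chars.isIn lq.toList (PySem.Chars.lower name.toList) = true
      · simp [h1, h2] at hx; right; rw [hx]
      · simp [h1, h2] at hx

-- the compound-key sort splits into the two bucket sorts
lemma sorted_split (l : List pvPair) (hl : ∀ x ∈ l, x.2 = 100 ∨ x.2 = 50) :
    PySem.List.sorted2 l (fun x => -x.2) (fun x => PySem.Dict.getD (PySem.Dict.mk x.1) "name" "") false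
      = PySem.List.sorted (l.filter (fun x => x.2 == 100)) (fun x => PySem.Dict.getD (PySem.Dict.mk x.1) "name" "") false
        ++ PySem.List.sorted (l.filter (fun x => x.2 == 50)) (fun x => PySem.Dict.getD (PySem.Dict.mk x.1) "name" "") false := by
  have h := split_fold l hl [] [] (by simp) (by simp)
  simp only [List.nil_append] at h
  simp only [PySem.List.sorted2, PySem.List.sorted]
  simp only [Bool.false_eq_true, if_false]
  convert h using 2

-- ===== VERDICT =====
theorem rank_contracts_by_relevance_spec : Claim_equal_rank_contracts_by_relevance := by
  intro contracts query _
  show rank_contracts_by_relevance contracts query = rank_contracts_by_relevance_alt contracts query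
  unfold rank_contracts_by_relevance rank_contracts_by_relevance_alt
  simp only []
  rw [foldA_eq (PySem.Str.lower query) contracts [],
      foldB_eq (PySem.Str.lower query) contracts [] []]
  simp only [List.nil_append]
  exact sorted_split (contracts.flatMap (pvG (PySem.Str.lower query)))
    (fun x hx => by
      rcases List.mem_flatMap.mp hx with ⟨item, _, hxi⟩
      exact pvG_scores _ item x hxi)
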